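-- pv_equiv track=rewrite | github.com/amol-ship-it/agi-core | domains/arc/transformation_primitives.py | compress_cols
-- ===== SOURCE A (Python) =====
-- Grid = list[list[int]]
--
-- def compress_cols(grid: Grid) -> Grid:
--     """Remove duplicate consecutive columns."""
--     if not grid or not grid[0]:
--         return grid
--     h, w = len(grid), len(grid[0])
--     keep = [0]
--     for c in range(1, w):
--         col = tuple(grid[r][c] for r in range(h))
--         prev = tuple(grid[r][c - 1] for r in range(h))
--         if col != prev:
--             keep.append(c)
--     return [[grid[r][c] for c in keep] for r in range(h)]
-- ===== SOURCE B (Python) =====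
-- def compress_cols(grid):
--     """Remove duplicate consecutive columns."""
--     if not grid or not grid[0]:
--         return grid
--     w = len(grid[0])
--     # changed[c] is True iff columns c and c+1 differ in some row: OR-accumulate
--     # a per-row difference mask instead of materialising any column.
--     changed = [False] * (w - 1)
--     for row in grid:
--         changed = [ch or row[c] != row[c + 1] for c, ch in enumerate(changed)]
--     return [[row[0]] + [row[c + 1] for c, ch in enumerate(changed) if ch] for row in grid]
-- ===== Notes on version B (the rewrite author's own statement) =====
-- stated objective: alternative
-- what changed: A materialises each column and its predecessor as tuples inside an index loop and collects kept column indices; B never builds a column: it OR-accumulates a row-wise boolean difference mask (changed[c] = some row differs between columns c and c+1) in one pass over rows, then filters each row by that mask.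
import Mathlib
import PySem

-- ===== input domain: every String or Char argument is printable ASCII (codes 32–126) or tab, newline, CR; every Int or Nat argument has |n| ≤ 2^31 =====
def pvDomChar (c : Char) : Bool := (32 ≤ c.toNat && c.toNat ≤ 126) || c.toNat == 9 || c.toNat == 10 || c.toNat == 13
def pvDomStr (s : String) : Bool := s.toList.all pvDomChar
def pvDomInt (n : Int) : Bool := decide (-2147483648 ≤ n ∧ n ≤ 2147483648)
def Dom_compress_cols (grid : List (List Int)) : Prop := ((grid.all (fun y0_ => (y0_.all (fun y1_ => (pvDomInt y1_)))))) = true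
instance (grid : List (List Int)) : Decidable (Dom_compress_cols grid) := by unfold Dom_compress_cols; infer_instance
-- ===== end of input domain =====

-- B replaces A's per-column tuple extraction by a row-wise OR-accumulated difference mask, then filters each row by it (alternative algorithm; same cost).


-- ===== PORT A =====
-- col/prev tuples of A are ported as List Int; grid[r][c] is PySem.List.pyGetD twice
-- (in range on every admitted input, see Pre_ below).
def pvColA (grid : List (List Int)) (h c : Int) : List Int :=
  (PySem.List.pyRange 0 h 1).map (fun r => PySem.List.pyGetD (PySem.List.pyGetD grid r []) c 0)

def compress_cols (grid : List (List Int)) : List (List Int) :=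
  if grid = [] ∨ grid.headD [] = [] then grid
  else
    let h : Int := grid.length
    let w : Int := (grid.headD []).length
    let keep := (PySem.List.pyRange 1 w 1).foldl
      (fun keep c => if pvColA grid h c ≠ pvColA grid h (c - 1) then keep ++ [c] else keep)
      [(0 : Int)]
    (PySem.List.pyRange 0 h 1).map
      (fun r => keep.map (fun c => PySem.List.pyGetD (PySem.List.pyGetD grid r []) c 0))

-- ===== PORT B =====
-- B never builds a column: it OR-accumulates a boolean mask 'changed' over the rows
-- ([False]*(w-1) is PySem.List.pyRepeat, enumerate is PySem.List.enumerate, row[i] is pyGetD),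
-- then emits row[0] plus the row entries selected by the mask.
def compress_cols_alt (grid : List (List Int)) : List (List Int) :=
  if grid = [] ∨ grid.headD [] = [] then grid
  else
    let w : Int := (grid.headD []).length
    let changed := grid.foldl
      (fun changed row => (PySem.List.enumerate changed).map
        (fun p => p.2 || decide (PySem.List.pyGetD row p.1 0 ≠ PySem.List.pyGetD row (p.1 + 1) 0)))
      (PySem.List.pyRepeat [false] (w - 1))
    grid.map (fun row =>
      PySem.List.pyGetD row 0 0 ::
        ((PySem.List.enumerate changed).filter (fun p => p.2)).map
          (fun p => PySem.List.pyGetD row (p.1 + 1) 0))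

-- ===== PRECONDITION & SPEC =====
-- Pre_ excludes exactly the grids on which A raises IndexError: first row strictly longer than
-- some other row (A indexes every row up to the first row's width).
def Pre_compress_cols (grid : List (List Int)) : Prop :=
  ∀ r ∈ grid, (grid.headD []).length ≤ r.length
instance (grid : List (List Int)) : Decidable (Pre_compress_cols grid) := by
  unfold Pre_compress_cols; infer_instance

def pvWitness_compress_cols : List (List Int) := [[1, 1, 2], [3, 3, 4]]

def Spec_compress_cols (grid : List (List Int)) (out : List (List Int)) : Prop :=
  out = compress_cols_alt grid
instance (grid : List (List Int)) (out : List (List Int)) : Decidable (Spec_compress_cols grid out) := by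
  unfold Spec_compress_cols; infer_instance

-- ===== CLAIM (what is proved, stated in full; the proofs are below) =====
def Claim_equal_compress_cols : Prop :=
  ∀ (grid : List (List Int)), Dom_compress_cols grid → Pre_compress_cols grid →
    Spec_compress_cols grid (compress_cols grid)

-- ===== LEMMAS AND PROOFS =====

-- the c-th column of the grid, Nat-indexed (proof-side view of A)
def pvColN (grid : List (List Int)) (c : Nat) : List Int :=
  grid.map (fun row => row.getD c 0)

-- boolean "columns c and c+1 differ somewhere" (proof-side view of B's mask entry)
def pvDiff (grid : List (List Int)) (c : Nat) : Bool :=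
  grid.any (fun row => decide (row.getD c 0 ≠ row.getD (c + 1) 0))

theorem pvMapRangeGetD {α β : Type} (d : α) (xs : List α) (f : α → β) :
    (List.range xs.length).map (fun r => f (xs.getD r d)) = xs.map f := by
  induction xs with
  | nil => simp
  | cons x t ih =>
      simp only [List.length_cons, List.range_succ_eq_map, List.map_cons, List.map_map,
        List.getD_cons_zero]
      refine congrArg (f x :: ·) ?_
      rw [← ih]
      apply List.map_congr_left; intro r _
      simp [List.getD_cons_succ]

theorem pvEnumMap {β : Type} (f : Int → Bool → β) :
    ∀ (acc : List Bool) (s : Int),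
      (PySem.List.enumerate acc s).map (fun p => f p.1 p.2)
        = (List.range acc.length).map (fun (c : Nat) => f (s + (c : Int)) (acc.getD c false)) := by
  intro acc
  induction acc with
  | nil => intro s; simp [PySem.List.enumerate_nil]
  | cons b t ih =>
      intro s
      rw [PySem.List.enumerate_cons, List.map_cons, ih (s + 1)]
      simp only [List.length_cons, List.range_succ_eq_map, List.map_cons, List.map_map,
        List.getD_cons_zero, Nat.cast_zero, add_zero]
      refine congrArg (f s b :: ·) ?_
      apply List.map_congr_left; intro c _
      simp only [Function.comp_apply, List.getD_cons_succ]
      congr 1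
      push_cast
      ring

theorem pvFoldChanged (rows : List (List Int)) :
    ∀ (acc : List Bool),
      rows.foldl
        (fun changed row => (PySem.List.enumerate changed).map
          (fun p => p.2 || decide (PySem.List.pyGetD row p.1 0 ≠ PySem.List.pyGetD row (p.1 + 1) 0)))
        acc
      = (List.range acc.length).map
          (fun c => acc.getD c false ||
            rows.any (fun row => decide (row.getD c 0 ≠ row.getD (c + 1) 0))) := by
  induction rows with
  | nil =>
      intro acc
      simp only [List.foldl_nil, List.any_nil, Bool.or_false]
      simpa using (pvMapRangeGetD false acc id).symm
  | cons row rows ih =>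
      intro acc
      rw [List.foldl_cons]
      have hstep : (PySem.List.enumerate acc).map
          (fun p => p.2 || decide (PySem.List.pyGetD row p.1 0 ≠ PySem.List.pyGetD row (p.1 + 1) 0))
          = (List.range acc.length).map
              (fun c => acc.getD c false || decide (row.getD c 0 ≠ row.getD (c + 1) 0)) := by
        rw [pvEnumMap (fun i b => b || decide (PySem.List.pyGetD row i 0 ≠ PySem.List.pyGetD row (i + 1) 0)) acc 0]
        apply List.map_congr_left; intro c _
        have h1 : ((0 : Int) + (c : Int)) = ((c : Nat) : Int) := by omega
        have h2 : ((c : Int) + 1) = (((c + 1 : Nat)) : Int) := by omega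
        rw [h1, h2, PySem.List.pyGetD_natCast, PySem.List.pyGetD_natCast]
      rw [hstep, ih]
      simp only [List.length_map, List.length_range]
      apply List.map_congr_left; intro c hc
      have hlt : c < acc.length := List.mem_range.mp hc
      have hget : ((List.range acc.length).map
          (fun c => acc.getD c false || decide (row.getD c 0 ≠ row.getD (c + 1) 0))).getD c false
          = (acc.getD c false || decide (row.getD c 0 ≠ row.getD (c + 1) 0)) := by
        rw [List.getD_eq_getElem?_getD, List.getElem?_map, List.getElem?_range hlt]
        rfl
      rw [hget, List.any_cons, Bool.or_assoc]

-- B's mask on a nonempty grid with first-row width w is the pointwise pvDiff vector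
theorem pvChanged_eq (grid : List (List Int)) (w : Nat) (hw : 1 ≤ w) :
    grid.foldl
      (fun changed row => (PySem.List.enumerate changed).map
        (fun p => p.2 || decide (PySem.List.pyGetD row p.1 0 ≠ PySem.List.pyGetD row (p.1 + 1) 0)))
      (PySem.List.pyRepeat [false] ((w : Int) - 1))
    = (List.range (w - 1)).map (pvDiff grid) := by
  have hrep : PySem.List.pyRepeat [false] ((w : Int) - 1) = List.replicate (w - 1) false := by
    rw [PySem.List.pyRepeat_singleton]
    congr 1
    omega
  rw [hrep, pvFoldChanged]
  simp only [List.length_replicate]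
  apply List.map_congr_left; intro c hc
  have hlt : c < w - 1 := List.mem_range.mp hc
  have : (List.replicate (w - 1) false).getD c false = false := by
    rw [List.getD_eq_getElem?_getD, List.getElem?_replicate]
    simp [hlt]
  rw [this, Bool.false_or]
  rfl

theorem pvColA_eq (grid : List (List Int)) (c : Nat) :
    pvColA grid (grid.length : Int) (c : Int) = pvColN grid c := by
  unfold pvColA pvColN
  rw [PySem.List.pyRange_zero_natCast]
  rw [List.map_map]
  have : ((fun r => PySem.List.pyGetD (PySem.List.pyGetD grid r []) (c : Int) 0) ∘
      (fun k : Nat => (k : Int))) = fun r : Nat => (grid.getD r []).getD c 0 := by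
    funext r; simp [PySem.List.pyGetD_natCast]
  rw [this]
  exact pvMapRangeGetD [] grid (fun row => row.getD c 0)

-- column inequality ↔ B's mask bit
theorem pvColN_ne_iff (grid : List (List Int)) (c : Nat) :
    (decide (pvColN grid (c + 1) ≠ pvColN grid c)) = pvDiff grid c := by
  unfold pvColN pvDiff
  rcases h : grid.any (fun row => decide (row.getD c 0 ≠ row.getD (c + 1) 0)) with _ | _
  · simp only [List.any_eq_false, decide_eq_true_eq, not_not] at h
    simp only [decide_eq_false_iff_not, not_not]
    apply List.map_congr_left
    intro row hrow
    exact (h row hrow).symm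
  · simp only [List.any_eq_true, decide_eq_true_eq] at h
    obtain ⟨row, hrow, hne⟩ := h
    simp only [decide_eq_true_eq]
    intro heq
    have h1 : (grid.map (fun row => row.getD (c + 1) 0)) = grid.map (fun row => row.getD c 0) := heq
    -- extract pointwise equality at row
    have : ∀ x ∈ grid, x.getD (c + 1) 0 = x.getD c 0 := by
      intro x hx
      have hidx := List.mem_iff_getElem.mp hx
      obtain ⟨i, hi, rfl⟩ := hidx
      have := congrArg (fun l => l[i]?) h1
      simpa [List.getElem?_map, List.getElem?_eq_getElem hi] using this
    exact hne ((this row hrow).symm)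

-- ===== VERDICT proof =====
theorem compress_cols_spec : Claim_equal_compress_cols := by
  intro grid _ hpre
  unfold Spec_compress_cols
  by_cases hguard : grid = [] ∨ grid.headD [] = []
  · simp only [compress_cols, compress_cols_alt, if_pos hguard]
  · simp only [compress_cols, compress_cols_alt, if_neg hguard]
    push_neg at hguard
    obtain ⟨hne, hhead⟩ := hguard
    obtain ⟨g0, gs, rfl⟩ : ∃ g0 gs, grid = g0 :: gs := by
      cases grid with
      | nil => exact absurd rfl hne
      | cons a t => exact ⟨a, t, rfl⟩
    set grid := g0 :: gs with hgrid
    have hhead' : (grid.headD []) = g0 := rfl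
    set w : Nat := g0.length with hw
    have hg0 : g0 ≠ [] := by intro h0; exact hhead (by simp [hgrid, h0])
    have hw1 : 1 ≤ w := by
      rw [hw]; cases g0 with
      | nil => exact absurd rfl hg0
      | cons a t => simp
    set h : Nat := grid.length with hh
    -- B's mask
    have hchanged := pvChanged_eq grid w hw1
    -- A's keep list
    have hpy : PySem.List.pyRange 1 (w : Int) 1
        = (List.range' 1 (w - 1)).map (fun c : Nat => (c : Int)) := by
      rw [PySem.List.pyRange_one, List.range'_eq_map_range, List.map_map]
      have : ((w : Int) - 1).toNat = w - 1 := by omega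
      rw [this]
      apply List.map_congr_left; intro k _
      simp only [Function.comp_apply]
      omega
    have hAkeep : (PySem.List.pyRange 1 ((grid.headD []).length : Int) 1).foldl
        (fun keep c => if pvColA grid (grid.length : Int) c ≠ pvColA grid (grid.length : Int) (c - 1)
                       then keep ++ [c] else keep) [(0 : Int)]
        = (0 : Int) :: ((List.range' 1 (w - 1)).filter
            (fun c => decide (pvColN grid c ≠ pvColN grid (c - 1)))).map (fun c : Nat => (c : Int)) := by
      rw [PySem.List.foldl_append_ite_eq_filter]
      rw [hhead', ← hw, hpy, List.filter_map]
      simp only [List.singleton_append]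
      congr 2
      apply List.filter_congr; intro c hc
      have hc1 : 1 ≤ c := by have := List.mem_range'.mp hc; omega
      have hsub : ((c : Int) - 1) = ((c - 1 : Nat) : Int) := by omega
      simp only [Function.comp_apply, hsub, pvColA_eq]
    -- A's output rows over the grid
    rw [hAkeep, hhead', ← hw, hchanged]
    rw [PySem.List.pyRange_zero_natCast, List.map_map]
    have hrows : (List.range h).map ((fun r => ((0 : Int) :: ((List.range' 1 (w - 1)).filter
          (fun c => decide (pvColN grid c ≠ pvColN grid (c - 1)))).map (fun c : Nat => (c : Int))).map
          (fun c => PySem.List.pyGetD (PySem.List.pyGetD grid r []) c 0)) ∘ (fun k : Nat => (k : Int)))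
        = grid.map (fun row => ((0 : Int) :: ((List.range' 1 (w - 1)).filter
          (fun c => decide (pvColN grid c ≠ pvColN grid (c - 1)))).map (fun c : Nat => (c : Int))).map
          (fun c => PySem.List.pyGetD row c 0)) := by
      have := pvMapRangeGetD [] grid (fun row => ((0 : Int) :: ((List.range' 1 (w - 1)).filter
          (fun c => decide (pvColN grid c ≠ pvColN grid (c - 1)))).map (fun c : Nat => (c : Int))).map
          (fun c => PySem.List.pyGetD row c 0))
      rw [← hh] at this
      rw [← this]
      apply List.map_congr_left; intro r _
      simp [PySem.List.pyGetD_natCast]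
    rw [hrows]
    -- compare per row
    apply List.map_congr_left; intro row hrow
    simp only [List.map_cons]
    congr 1
    -- B's tail: enumerate of the mask, filtered
    have henum : PySem.List.enumerate ((List.range (w - 1)).map (pvDiff grid))
        = (List.range (w - 1)).map (fun (c : Nat) => ((c : Int), pvDiff grid c)) := by
      have := pvEnumMap (fun i b => ((i : Int), b)) ((List.range (w - 1)).map (pvDiff grid)) 0
      simp only [List.length_map, List.length_range] at this
      have hid : (PySem.List.enumerate ((List.range (w - 1)).map (pvDiff grid)) 0).map
          (fun p => (p.1, p.2)) = PySem.List.enumerate ((List.range (w - 1)).map (pvDiff grid)) 0 := by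
        simp
      rw [hid] at this
      rw [show PySem.List.enumerate ((List.range (w - 1)).map (pvDiff grid))
            = PySem.List.enumerate ((List.range (w - 1)).map (pvDiff grid)) 0 from rfl, this]
      apply List.map_congr_left; intro c hc
      have hlt : c < w - 1 := List.mem_range.mp hc
      rw [List.getD_eq_getElem?_getD, List.getElem?_map, List.getElem?_range hlt]
      simp
    rw [henum, List.filter_map, List.map_map]
    -- A's tail over range' 1 (w-1)
    rw [List.range'_eq_map_range, List.filter_map, List.map_map, List.map_map]
    have hfeq : (List.range (w - 1)).filter ((fun c => decide (pvColN grid c ≠ pvColN grid (c - 1))) ∘ (fun i => 1 + i))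
        = (List.range (w - 1)).filter ((fun p : Int × Bool => p.2) ∘ fun (c : Nat) => ((c : Int), pvDiff grid c)) := by
      apply List.filter_congr; intro c hc
      simp only [Function.comp_apply]
      have ha : 1 + c - 1 = c := by omega
      have hb : 1 + c = c + 1 := by omega
      rw [ha, hb, pvColN_ne_iff]
    rw [hfeq]
    apply List.map_congr_left; intro c _
    simp only [Function.comp_apply]
    congr 1
    push_cast
    ring
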